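-- pv_equiv track=rewrite | github.com/vallmeister/Programming | src/leetcode/biweekly_contest_175/q1.py | reverseByType
-- ===== SOURCE A (Python) =====
-- def reverseByType(s: str) -> str:
--     lowercase = 'abcdefghijklmnopqrstuvwxyz'
--     s = list(s)
--     normal = []
--     special = []
--     for c in s:
--         if c in lowercase:
--             normal.append(c)
--         else:
--             special.append(c)
--     for i in range(len(s)):
--         if s[i] in lowercase:
--             s[i] = normal.pop()
--         else:
--             s[i] = special.pop()
--     return ''.join(s)
-- ===== SOURCE B (Python) =====
-- def reverseByType(s: str) -> str:
--     lowercase = 'abcdefghijklmnopqrstuvwxyz'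
--     chars = list(s)
--     low_idx = [i for i, c in enumerate(chars) if c in lowercase]
--     oth_idx = [i for i, c in enumerate(chars) if c not in lowercase]
--     for idx in (low_idx, oth_idx):
--         l, r = 0, len(idx) - 1
--         while l < r:
--             chars[idx[l]], chars[idx[r]] = chars[idx[r]], chars[idx[l]]
--             l += 1
--             r -= 1
--     return ''.join(chars)
-- ===== Notes on version B (the rewrite author's own statement) =====
-- stated objective: alternative
-- what changed: Instead of partitioning characters into two stacks and popping them back while rewriting every position, B collects the index lists of lowercase and non-lowercase positions and reverses each group in place with a two-pointer swap loop.
import Mathlib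
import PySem

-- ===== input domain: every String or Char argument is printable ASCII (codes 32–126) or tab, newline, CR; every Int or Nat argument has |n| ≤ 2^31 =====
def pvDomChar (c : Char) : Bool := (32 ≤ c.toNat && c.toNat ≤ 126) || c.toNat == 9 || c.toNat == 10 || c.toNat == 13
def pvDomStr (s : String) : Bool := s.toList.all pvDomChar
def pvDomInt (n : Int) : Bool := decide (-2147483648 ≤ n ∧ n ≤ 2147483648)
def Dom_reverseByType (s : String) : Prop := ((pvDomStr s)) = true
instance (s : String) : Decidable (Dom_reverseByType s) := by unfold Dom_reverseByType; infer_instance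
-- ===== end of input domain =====

-- B reverses each character class in place via two index lists and a two-pointer swap loop,
-- instead of A's partition-into-stacks-then-pop rewrite; objective: alternative (same O(n) cost).

-- shared trivial helper: the membership test `c in 'abcdefghijklmnopqrstuvwxyz'` both Pythons use
def pvLowMem (c : Char) : Bool := "abcdefghijklmnopqrstuvwxyz".toList.contains c

-- ===== PORT A =====
-- first loop: partition into (normal, special) by appending; second loop: rewrite s[i] with pop()
-- (pop() never hits an empty list: each class is written exactly as often as it was filled;
--  the `.getD ' '` default is therefore never used)
def reverseByType (s : String) : String :=
  let s0 := s.toList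
  let ns := s0.foldl (fun (acc : List Char × List Char) c =>
      if pvLowMem c then (acc.1 ++ [c], acc.2) else (acc.1, acc.2 ++ [c])) ([], [])
  let fin := (List.range s0.length).foldl (fun (st : List Char × List Char × List Char) i =>
      if pvLowMem (st.1.getD i ' ') then
        (st.1.set i (st.2.1.getLast?.getD ' '), st.2.1.dropLast, st.2.2)
      else
        (st.1.set i (st.2.2.getLast?.getD ' '), st.2.1, st.2.2.dropLast)) (s0, ns.1, ns.2)
  String.mk fin.1

-- ===== PORT B =====
-- the `while l < r` two-pointer swap loop of Source B
def pvTpLoop (idx : List Nat) (chars : List Char) (l r : Int) : List Char :=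
  if h : l < r then
    let p := idx.getD l.toNat 0
    let q := idx.getD r.toNat 0
    pvTpLoop idx ((chars.set p (chars.getD q ' ')).set q (chars.getD p ' ')) (l + 1) (r - 1)
  else chars
termination_by (r - l).toNat
decreasing_by omega

-- indices produced by `enumerate` are nonnegative, so representing them as Nat is exact
def reverseByType_alt (s : String) : String :=
  let chars := s.toList
  let lowIdx := ((PySem.List.enumerate chars 0).filter (fun ic => pvLowMem ic.2)).map (fun ic => ic.1.toNat)
  let othIdx := ((PySem.List.enumerate chars 0).filter (fun ic => !pvLowMem ic.2)).map (fun ic => ic.1.toNat)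
  let c1 := pvTpLoop lowIdx chars 0 ((lowIdx.length : Int) - 1)
  let c2 := pvTpLoop othIdx c1 0 ((othIdx.length : Int) - 1)
  String.mk c2

-- ===== PRECONDITION & SPEC =====
def Spec_reverseByType (s : String) (out : String) : Prop := out = reverseByType_alt s
instance (s : String) (out : String) : Decidable (Spec_reverseByType s out) := by unfold Spec_reverseByType; infer_instance

-- ===== CLAIM (what is proved, stated in full; the proofs are below) =====
def Claim_equal_reverseByType : Prop := ∀ (s : String), Dom_reverseByType s → Spec_reverseByType s (reverseByType s)

-- ===== LEMMAS AND PROOFS =====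

-- the common intermediate program: consume the reversed class lists from the front
def pvFill : List Char → List Char → List Char → List Char
  | [], _, _ => []
  | c :: cs, nl, ol =>
    if pvLowMem c then nl.headD ' ' :: pvFill cs nl.tail ol
    else ol.headD ' ' :: pvFill cs nl ol.tail

-- positions (from the front) at which p holds
def pvIdxs (p : Char → Bool) : List Char → List Nat
  | [] => []
  | c :: cs => if p c then 0 :: (pvIdxs p cs).map (· + 1) else (pvIdxs p cs).map (· + 1)

def pvWriteAll (c : List Char) (ws : List (Nat × Char)) : List Char :=
  ws.foldl (fun a pv => a.set pv.1 pv.2) c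

-- ---------- basic getD/set helpers ----------

lemma pvGetD_append (pre : List Char) (c : Char) (cs : List Char) (d : Char) :
    (pre ++ c :: cs).getD pre.length d = c := by
  induction pre with
  | nil => rfl
  | cons x xs ih => simpa using ih

lemma pvSet_append (pre : List Char) (c : Char) (cs : List Char) (v : Char) :
    (pre ++ c :: cs).set pre.length v = pre ++ v :: cs := by
  induction pre with
  | nil => rfl
  | cons x xs ih => simpa using ih

lemma pvGetD_set_ne {l : List Char} {i j : Nat} (h : i ≠ j) (v d : Char) :
    (l.set i v).getD j d = l.getD j d := by
  simp [List.getD, List.getElem?_set_ne h]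

lemma pvGetElem?_tail (l : List Char) (k : Nat) : l.tail[k]? = l[k + 1]? := by
  cases l <;> simp

lemma pvGetD_reverse (l : List Char) (k : Nat) (hk : k < l.length) (d : Char) :
    l.reverse.getD k d = l.getD (l.length - 1 - k) d := by
  have h1 : k < l.reverse.length := by simpa using hk
  have h2 : l.length - 1 - k < l.length := by omega
  rw [List.getD_eq_getElem _ _ h1, List.getD_eq_getElem _ _ h2, List.getElem_reverse]

lemma pvSet_getD_self (c : List Char) (p : Nat) (d : Char) :
    c.set p (c.getD p d) = c := by
  by_cases h : p < c.length
  · rw [List.getD_eq_getElem _ _ h]; exact List.set_getElem_self ..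
  · exact List.set_eq_of_length_le (by omega)

-- ---------- A = fill ----------

lemma pvPartition_loop (xs : List Char) (a b : List Char) :
    xs.foldl (fun (acc : List Char × List Char) c =>
        if pvLowMem c then (acc.1 ++ [c], acc.2) else (acc.1, acc.2 ++ [c])) (a, b)
      = (a ++ xs.filter pvLowMem, b ++ xs.filter (fun c => !pvLowMem c)) := by
  induction xs generalizing a b with
  | nil => simp
  | cons c cs ih =>
    by_cases h : pvLowMem c <;> simp [h, ih, List.filter_cons]

lemma pvGetLastD_eq_reverse_headD (l : List Char) (d : Char) :
    l.getLast?.getD d = l.reverse.headD d := by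
  cases l using List.reverseRecOn <;> simp

lemma pvReverse_dropLast (l : List Char) : l.dropLast.reverse = l.reverse.tail := by
  cases l using List.reverseRecOn <;> simp

lemma pvA_loop (suf pre nl ol : List Char) :
    ((List.range' pre.length suf.length).foldl (fun (st : List Char × List Char × List Char) i =>
      if pvLowMem (st.1.getD i ' ') then
        (st.1.set i (st.2.1.getLast?.getD ' '), st.2.1.dropLast, st.2.2)
      else
        (st.1.set i (st.2.2.getLast?.getD ' '), st.2.1, st.2.2.dropLast)) (pre ++ suf, nl, ol)).1
      = pre ++ pvFill suf nl.reverse ol.reverse := by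
  induction suf generalizing pre nl ol with
  | nil => simp [pvFill]
  | cons c cs ih =>
    rw [List.length_cons, List.range'_succ]
    simp only [List.foldl_cons]
    rw [pvGetD_append]
    by_cases h : pvLowMem c
    · rw [if_pos h]
      simp only [pvSet_append]
      have := ih (pre ++ [nl.getLast?.getD ' ']) nl.dropLast ol
      simp only [List.length_append, List.length_cons, List.length_nil, List.append_assoc,
        List.singleton_append, Nat.zero_add] at this
      rw [this, pvGetLastD_eq_reverse_headD, pvReverse_dropLast]
      simp only [pvFill]
      rw [if_pos h]
    · rw [if_neg h]
      simp only [pvSet_append]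
      have := ih (pre ++ [ol.getLast?.getD ' ']) nl ol.dropLast
      simp only [List.length_append, List.length_cons, List.length_nil, List.append_assoc,
        List.singleton_append, Nat.zero_add] at this
      rw [this, pvGetLastD_eq_reverse_headD, pvReverse_dropLast]
      simp only [pvFill]
      rw [if_neg h]

lemma pvA_eq_fill (s : String) :
    reverseByType s = String.mk (pvFill s.toList (s.toList.filter pvLowMem).reverse
      ((s.toList.filter (fun c => !pvLowMem c)).reverse)) := by
  unfold reverseByType
  simp only [pvPartition_loop, List.nil_append]
  have := pvA_loop s.toList [] (s.toList.filter pvLowMem) (s.toList.filter (fun c => !pvLowMem c))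
  simp only [List.length_nil, List.nil_append, ← List.range_eq_range'] at this
  rw [this]

-- ---------- fill pointwise ----------

lemma pvFill_length (cs nl ol : List Char) : (pvFill cs nl ol).length = cs.length := by
  induction cs generalizing nl ol with
  | nil => rfl
  | cons c cs ih => by_cases h : pvLowMem c <;> simp [pvFill, h, ih]

lemma pvFill_getD (cs nl ol : List Char) (j : Nat) (hj : j < cs.length) :
    (pvFill cs nl ol).getD j ' ' =
      if pvLowMem (cs.getD j ' ') then nl.getD ((cs.take j).countP pvLowMem) ' '
      else ol.getD ((cs.take j).countP (fun c => !pvLowMem c)) ' ' := by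
  induction cs generalizing j nl ol with
  | nil => simp at hj
  | cons c cs ih =>
    cases j with
    | zero =>
      by_cases h : pvLowMem c
      · cases nl <;> simp [pvFill, h, List.getD]
      · cases ol <;> simp [pvFill, h, List.getD]
    | succ j =>
      have hj' : j < cs.length := by simpa using hj
      by_cases h : pvLowMem c
      · have e1 : pvFill (c :: cs) nl ol = nl.headD ' ' :: pvFill cs nl.tail ol := by
          simp [pvFill, h]
        rw [e1, List.getD_cons_succ, List.getD_cons_succ, ih nl.tail ol j hj',
          List.take_succ_cons, List.countP_cons, List.countP_cons]
        simp [h, pvGetElem?_tail, List.getD]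
      · have e1 : pvFill (c :: cs) nl ol = ol.headD ' ' :: pvFill cs nl ol.tail := by
          simp [pvFill, h]
        rw [e1, List.getD_cons_succ, List.getD_cons_succ, ih nl ol.tail j hj',
          List.take_succ_cons, List.countP_cons, List.countP_cons]
        simp [h, pvGetElem?_tail, List.getD]

-- ---------- pvIdxs facts ----------

lemma pvIdxs_mem_lt (p : Char → Bool) (cs : List Char) :
    ∀ j ∈ pvIdxs p cs, j < cs.length := by
  induction cs with
  | nil => simp [pvIdxs]
  | cons c cs ih =>
    intro j hj
    by_cases h : p c <;> simp [pvIdxs, h] at hj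
    · rcases hj with rfl | ⟨k, hk, rfl⟩
      · simp
      · have := ih k hk; simpa using Nat.succ_lt_succ this
    · rcases hj with ⟨k, hk, rfl⟩
      have := ih k hk; simpa using Nat.succ_lt_succ this

lemma pvIdxs_pairwise (p : Char → Bool) (cs : List Char) :
    (pvIdxs p cs).Pairwise (· < ·) := by
  induction cs with
  | nil => simp [pvIdxs]
  | cons c cs ih =>
    have hmap : List.Pairwise (· < ·) ((pvIdxs p cs).map (· + 1)) := by
      rw [List.pairwise_map]
      exact ih.imp (fun hab => by omega)
    by_cases h : p c
    · rw [pvIdxs, if_pos h]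
      refine List.Pairwise.cons ?_ hmap
      intro j hj
      simp only [List.mem_map] at hj
      obtain ⟨k, _, rfl⟩ := hj
      omega
    · rw [pvIdxs, if_neg h]
      exact hmap

lemma pvIdxs_nodup (p : Char → Bool) (cs : List Char) : (pvIdxs p cs).Nodup :=
  (pvIdxs_pairwise p cs).imp (fun h => by omega)

lemma pvIdxs_length (p : Char → Bool) (cs : List Char) :
    (pvIdxs p cs).length = (cs.filter p).length := by
  induction cs with
  | nil => rfl
  | cons c cs ih => by_cases h : p c <;> simp [pvIdxs, h, List.filter_cons, ih]

lemma pvGetD_map_succ (l : List Nat) (k : Nat) (hk : k < l.length) :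
    (l.map (· + 1)).getD k 0 = l.getD k 0 + 1 := by
  rw [List.getD_eq_getElem _ _ (by simpa using hk), List.getElem_map, List.getD_eq_getElem _ _ hk]

lemma pvIdxs_getD_filter (p : Char → Bool) (cs : List Char) (k : Nat)
    (hk : k < (pvIdxs p cs).length) :
    cs.getD ((pvIdxs p cs).getD k 0) ' ' = (cs.filter p).getD k ' ' := by
  induction cs generalizing k with
  | nil => simp [pvIdxs] at hk
  | cons c cs ih =>
    by_cases h : p c
    · cases k with
      | zero =>
        rw [pvIdxs, if_pos h, List.getD_cons_zero, List.getD_cons_zero,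
          List.filter_cons_of_pos h, List.getD_cons_zero]
      | succ k =>
        have hk' : k < (pvIdxs p cs).length := by
          rw [pvIdxs, if_pos h] at hk; simpa using hk
        rw [pvIdxs, if_pos h, List.getD_cons_succ, pvGetD_map_succ _ _ hk',
          List.getD_cons_succ, List.filter_cons_of_pos h, List.getD_cons_succ]
        exact ih k hk'
    · have hk' : k < (pvIdxs p cs).length := by
        rw [pvIdxs, if_neg h] at hk; simpa using hk
      rw [pvIdxs, if_neg h, pvGetD_map_succ _ _ hk', List.getD_cons_succ,
        List.filter_cons_of_neg h]
      exact ih k hk'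

lemma pvIdxs_rank (p : Char → Bool) (cs : List Char) (j : Nat) (hj : j < cs.length)
    (hp : p (cs.getD j ' ')) :
    (cs.take j).countP p < (pvIdxs p cs).length ∧
      (pvIdxs p cs).getD ((cs.take j).countP p) 0 = j := by
  induction cs generalizing j with
  | nil => simp at hj
  | cons c cs ih =>
    cases j with
    | zero =>
      have hc : p c := by simpa [List.getD] using hp
      simp [pvIdxs, hc]
    | succ j =>
      have hj' : j < cs.length := by simpa using hj
      have hp' : p (cs.getD j ' ') := by simpa [List.getD_cons_succ] using hp
      obtain ⟨h1, h2⟩ := ih j hj' hp'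
      by_cases hc : p c
      · rw [List.take_succ_cons, List.countP_cons_of_pos hc, pvIdxs, if_pos hc]
        constructor
        · simpa using Nat.succ_lt_succ h1
        · rw [List.getD_cons_succ, pvGetD_map_succ _ _ h1, h2]
      · rw [List.take_succ_cons, List.countP_cons_of_neg hc, pvIdxs, if_neg hc]
        constructor
        · simpa using h1
        · rw [pvGetD_map_succ _ _ h1, h2]

lemma pvIdxs_mem_iff (p : Char → Bool) (cs : List Char) (j : Nat) :
    j ∈ pvIdxs p cs ↔ j < cs.length ∧ p (cs.getD j ' ') := by
  induction cs generalizing j with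
  | nil => simp [pvIdxs]
  | cons c cs ih =>
    by_cases h : p c <;> cases j <;>
      simp [pvIdxs, h, ih, List.getD, List.getD_cons_succ] <;> omega

lemma pvEnum_idxs (p : Char → Bool) (cs : List Char) (s : Nat) :
    ((PySem.List.enumerate cs (s : Int)).filter (fun ic => p ic.2)).map (fun ic => ic.1.toNat)
      = (pvIdxs p cs).map (· + s) := by
  induction cs generalizing s with
  | nil => simp [pvIdxs]
  | cons c cs ih =>
    rw [PySem.List.enumerate_cons]
    have hs : ((s : Int) + 1) = ((s + 1 : Nat) : Int) := by push_cast; ring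
    by_cases h : p c
    · rw [List.filter_cons_of_pos (by simp [h]), List.map_cons, hs, ih (s + 1),
        pvIdxs, if_pos h, List.map_cons]
      congr 1
      · simp
      · rw [List.map_map]
        refine List.map_congr_left (fun a _ => ?_)
        simp [Function.comp]
        omega
    · rw [List.filter_cons_of_neg (by simp [h]), hs, ih (s + 1), pvIdxs, if_neg h,
        List.map_map]
      refine List.map_congr_left (fun a _ => ?_)
      simp [Function.comp]
      omega

-- ---------- writeAll facts ----------

lemma pvWriteAll_length (ws : List (Nat × Char)) (c : List Char) :
    (pvWriteAll c ws).length = c.length := by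
  induction ws generalizing c with
  | nil => rfl
  | cons w ws ih => simp [pvWriteAll, List.foldl_cons] at ih ⊢; simp [ih]

lemma pvWriteAll_getD_notin (ws : List (Nat × Char)) (c : List Char) (j : Nat)
    (hj : ∀ w ∈ ws, w.1 ≠ j) (d : Char) :
    (pvWriteAll c ws).getD j d = c.getD j d := by
  induction ws generalizing c with
  | nil => rfl
  | cons w ws ih =>
    simp only [pvWriteAll, List.foldl_cons] at ih ⊢
    rw [ih _ (fun x hx => hj x (by simp [hx])), pvGetD_set_ne (hj w (by simp)) _ d]

lemma pvWriteAll_set_comm (ws : List (Nat × Char)) (c : List Char) (q : Nat) (v : Char)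
    (hq : ∀ w ∈ ws, w.1 ≠ q) :
    pvWriteAll (c.set q v) ws = (pvWriteAll c ws).set q v := by
  induction ws generalizing c with
  | nil => rfl
  | cons w ws ih =>
    simp only [pvWriteAll, List.foldl_cons] at ih ⊢
    rw [List.set_comm v w.2 (Ne.symm (hq w (by simp))), ih _ (fun x hx => hq x (by simp [hx]))]

lemma pvWriteAll_getD_rank (idx : List Nat) (vals : List Char) (c : List Char) (k : Nat)
    (hnd : idx.Nodup) (hlen : vals.length = idx.length) (hk : k < idx.length)
    (hb : idx.getD k 0 < c.length) :
    (pvWriteAll c (idx.zip vals)).getD (idx.getD k 0) ' ' = vals.getD k ' ' := by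
  induction idx generalizing vals c k with
  | nil => simp at hk
  | cons p idx ih =>
    cases vals with
    | nil => simp at hlen
    | cons v vals =>
      simp only [List.zip_cons_cons, pvWriteAll, List.foldl_cons]
      cases k with
      | zero =>
        simp only [List.getD_cons_zero] at hb ⊢
        have : ∀ w ∈ idx.zip vals, w.1 ≠ p := by
          intro w hw
          have := List.of_mem_zip hw
          have hnp : w.1 ∈ idx := this.1
          intro he; rw [he] at hnp
          exact (List.nodup_cons.mp hnd).1 hnp
        rw [show (List.foldl (fun a pv => a.set pv.1 pv.2) (c.set p v) (idx.zip vals))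
            = pvWriteAll (c.set p v) (idx.zip vals) from rfl,
          pvWriteAll_getD_notin _ _ _ this, List.getD_eq_getElem _ _ (by simpa using hb),
          List.getElem_set_self]
      | succ k =>
        have hk' : k < idx.length := by simpa using hk
        have hb' : idx.getD k 0 < (c.set p v).length := by simpa using hb
        simpa using ih vals (c.set p v) k (List.nodup_cons.mp hnd).2 (by simpa using hlen) hk' hb'

-- ---------- the two-pointer loop is writeAll of reversed values ----------

lemma pvWin_decomp (idx : List Nat) (l w : Nat) (h : l + (w + 2) ≤ idx.length) :
    (idx.drop l).take (w + 2)
      = idx.getD l 0 :: ((idx.drop (l + 1)).take w ++ [idx.getD (l + w + 1) 0]) := by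
  have hl : l < idx.length := by omega
  have hlw : l + w + 1 < idx.length := by omega
  have hd : idx.drop l = idx.getD l 0 :: idx.drop (l + 1) := by
    rw [List.getD_eq_getElem _ _ hl]
    exact List.drop_eq_getElem_cons hl
  rw [hd, List.take_succ_cons]
  congr 1
  have hlen : w < (idx.drop (l + 1)).length := by simp; omega
  rw [← List.take_concat_get hlen, List.concat_eq_append]
  congr 2
  rw [List.getElem_drop, List.getD_eq_getElem _ _ hlw]
  congr 1
  omega

lemma pvTp_eq_writeAll (w : Nat) (idx : List Nat) (c : List Char) (l : Nat)
    (hw : l + w ≤ idx.length) (hnd : ((idx.drop l).take w).Nodup)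
    (hb : ∀ j ∈ idx, j < c.length) :
    pvTpLoop idx c l ((l : Int) + w - 1)
      = pvWriteAll c (((idx.drop l).take w).zip
          ((((idx.drop l).take w).map (fun p => c.getD p ' ')).reverse)) := by
  induction w using Nat.strong_induction_on generalizing c l with
  | _ w ih =>
    match w with
    | 0 =>
      rw [pvTpLoop]
      have hno : ¬ ((l : Int) < (l : Int) + (0 : Nat) - 1) := by
        push_cast; omega
      rw [dif_neg (by push_cast at hno ⊢; omega)]
      simp [pvWriteAll]
    | 1 =>
      rw [pvTpLoop]
      have hl : l < idx.length := by omega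
      rw [dif_neg (by push_cast; omega)]
      have h1 : (idx.drop l).take 1 = [idx.getD l 0] := by
        rw [List.getD_eq_getElem _ _ hl, List.drop_eq_getElem_cons hl]; rfl
      rw [h1]
      exact (pvSet_getD_self c (idx.getD l 0) ' ').symm
    | (w + 2) =>
      rw [pvTpLoop, dif_pos (by push_cast; omega)]
      have htn : ((l : Int) + ((w + 2 : Nat) : Int) - 1).toNat = l + w + 1 := by push_cast; omega
      have hln : ((l : Int)).toNat = l := by omega
      simp only [hln, htn]
      set p := idx.getD l 0 with hp
      set q := idx.getD (l + w + 1) 0 with hq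
      have hdec := pvWin_decomp idx l w hw
      set mid := (idx.drop (l + 1)).take w with hmid
      have hndc : (p :: (mid ++ [q])).Nodup := by rw [← hdec]; exact hnd
      have hpq : p ≠ q := by
        have := (List.nodup_cons.mp hndc).1; simp at this; tauto
      have hpmid : ∀ x ∈ mid, x ≠ p := by
        intro x hx; have h := (List.nodup_cons.mp hndc).1
        intro he; rw [he] at hx; exact h (by simp [hx])
      have hqmid : ∀ x ∈ mid, x ≠ q := by
        have hdisj := List.disjoint_of_nodup_append (List.nodup_cons.mp hndc).2
        intro x hx he
        exact (List.disjoint_left.mp hdisj) hx (by subst he; exact List.mem_cons_self)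
      set c1 := (c.set p (c.getD q ' ')).set q (c.getD p ' ') with hc1
      have hrec : pvTpLoop idx c1 ((l : Int) + 1) ((l : Int) + ((w + 2 : Nat) : Int) - 1 - 1)
          = pvWriteAll c1 (mid.zip ((mid.map (fun x => c1.getD x ' ')).reverse)) := by
        have he1 : ((l : Int) + ((w + 2 : Nat) : Int) - 1 - 1) = ((l + 1 : Nat) : Int) + ((w : Nat) : Int) - 1 := by push_cast; ring
        have he2 : ((l : Int) + 1) = ((l + 1 : Nat) : Int) := by push_cast; ring
        rw [he1, he2]
        exact ih w (by omega) c1 (l + 1) (by omega)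
          ((List.nodup_append.mp (List.nodup_cons.mp hndc).2).1)
          (fun j hj => by simp only [hc1, List.length_set]; exact hb j hj)
      have hc1mid : ∀ x ∈ mid, c1.getD x ' ' = c.getD x ' ' := by
        intro x hx
        rw [hc1, pvGetD_set_ne (fun he => hqmid x hx he.symm) _ _,
          pvGetD_set_ne (fun he => hpmid x hx he.symm) _ _]
      have hmapmid : mid.map (fun x => c1.getD x ' ') = mid.map (fun x => c.getD x ' ') :=
        List.map_congr_left (fun x hx => hc1mid x hx)
      rw [hrec, hmapmid, hdec]
      -- both sides are writes over c; reorganise the RHS zip/foldl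
      have hlen : mid.length = (mid.map (fun x => c.getD x ' ')).reverse.length := by simp
      rw [List.map_cons, List.map_append, List.map_singleton, List.reverse_cons,
        List.reverse_append, List.reverse_singleton]
      simp only [List.singleton_append, List.cons_append, List.nil_append]
      rw [List.zip_cons_cons, List.zip_append hlen]
      simp only [List.zip_cons_cons, List.zip_nil_right, List.append_nil]
      show pvWriteAll c1 (mid.zip (mid.map (fun x => c.getD x ' ')).reverse)
        = pvWriteAll c ((p, c.getD q ' ') :: (mid.zip (mid.map (fun x => c.getD x ' ')).reverse ++ [(q, c.getD p ' ')]))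
      have hstep : pvWriteAll c ((p, c.getD q ' ') :: (mid.zip (mid.map (fun x => c.getD x ' ')).reverse ++ [(q, c.getD p ' ')]))
          = (pvWriteAll (c.set p (c.getD q ' ')) (mid.zip (mid.map (fun x => c.getD x ' ')).reverse)).set q (c.getD p ' ') := by
        simp [pvWriteAll, List.foldl_append]
      rw [hstep, hc1, ← pvWriteAll_set_comm]
      intro x hx
      exact hqmid x.1 (List.of_mem_zip hx).1

-- ---------- assembling B ----------

lemma pvGetD_map_get (c0 : List Char) (l : List Nat) (i : Nat) (hi : i < l.length) (d : Char) :
    (l.map (fun p => c0.getD p ' ')).getD i d = c0.getD (l.getD i 0) ' ' := by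
  rw [List.getD_eq_getElem _ _ (by simpa using hi), List.getElem_map,
    List.getD_eq_getElem l _ hi]

lemma pvB_pass (c0 : List Char) (p : Char → Bool) (c : List Char) (j : Nat)
    (hj : j < c0.length) (hpj : p (c0.getD j ' '))
    (hlen : c0.length ≤ c.length) :
    (pvWriteAll c ((pvIdxs p c0).zip
        (((pvIdxs p c0).map (fun x => c0.getD x ' ')).reverse))).getD j ' '
      = ((c0.filter p).reverse).getD ((c0.take j).countP p) ' ' := by
  obtain ⟨hk, hkj⟩ := pvIdxs_rank p c0 j hj hpj
  have hflen := pvIdxs_length p c0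
  have hvlen : (((pvIdxs p c0).map (fun x => c0.getD x ' ')).reverse).length
      = (pvIdxs p c0).length := by simp
  have hbnd : (pvIdxs p c0).getD ((c0.take j).countP p) 0 < c.length := by
    rw [hkj]; omega
  have hmain := pvWriteAll_getD_rank (pvIdxs p c0)
    (((pvIdxs p c0).map (fun x => c0.getD x ' ')).reverse) c ((c0.take j).countP p)
    (pvIdxs_nodup p c0) hvlen hk hbnd
  rw [hkj] at hmain
  rw [hmain, pvGetD_reverse _ _ (by simpa using hk),
    show ((pvIdxs p c0).map (fun x => c0.getD x ' ')).length = (pvIdxs p c0).length from by simp,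
    pvGetD_map_get c0 _ _ (by omega), pvIdxs_getD_filter p c0 _ (by omega),
    pvGetD_reverse _ _ (by omega)]
  congr 1
  omega

lemma pvB_core (c0 : List Char) :
    pvWriteAll
      (pvWriteAll c0 ((pvIdxs pvLowMem c0).zip
        (((pvIdxs pvLowMem c0).map (fun p => c0.getD p ' ')).reverse)))
      ((pvIdxs (fun c => !pvLowMem c) c0).zip
        (((pvIdxs (fun c => !pvLowMem c) c0).map (fun p =>
          (pvWriteAll c0 ((pvIdxs pvLowMem c0).zip
            (((pvIdxs pvLowMem c0).map (fun p => c0.getD p ' ')).reverse))).getD p ' ')).reverse))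
      = pvFill c0 (c0.filter pvLowMem).reverse ((c0.filter (fun c => !pvLowMem c)).reverse) := by
  set c1 := pvWriteAll c0 ((pvIdxs pvLowMem c0).zip
    (((pvIdxs pvLowMem c0).map (fun p => c0.getD p ' ')).reverse)) with hc1
  have hlen1 : c1.length = c0.length := pvWriteAll_length _ _
  -- the first pass leaves non-lowercase positions untouched
  have hc1_not : ∀ j : Nat, ¬ pvLowMem (c0.getD j ' ') → c1.getD j ' ' = c0.getD j ' ' := by
    intro j hj
    have hji : j ∉ pvIdxs pvLowMem c0 := fun hmem =>
      hj ((pvIdxs_mem_iff pvLowMem c0 j).mp hmem).2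
    exact pvWriteAll_getD_notin _ _ _
      (fun w hw he => hji (by rw [← he]; exact (List.of_mem_zip hw).1)) ' '
  -- the second pass reads the original characters: its positions were untouched
  have hvalsO : (pvIdxs (fun c => !pvLowMem c) c0).map (fun p => c1.getD p ' ')
      = (pvIdxs (fun c => !pvLowMem c) c0).map (fun p => c0.getD p ' ') := by
    refine List.map_congr_left (fun x hx => hc1_not x ?_)
    have hx2 := ((pvIdxs_mem_iff (fun c => !pvLowMem c) c0 x).mp hx).2
    simp only [Bool.not_eq_true'] at hx2
    exact Bool.eq_false_iff.mp hx2
  rw [hvalsO]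
  set c2 := pvWriteAll c1 ((pvIdxs (fun c => !pvLowMem c) c0).zip
    (((pvIdxs (fun c => !pvLowMem c) c0).map (fun p => c0.getD p ' ')).reverse)) with hc2
  have hlen2 : c2.length = c0.length := by rw [hc2, pvWriteAll_length, hlen1]
  have hlenf : (pvFill c0 (c0.filter pvLowMem).reverse
      ((c0.filter (fun c => !pvLowMem c)).reverse)).length = c0.length := pvFill_length _ _ _
  have hpt : ∀ j : Nat, j < c0.length → c2.getD j ' ' =
      (pvFill c0 (c0.filter pvLowMem).reverse
        ((c0.filter (fun c => !pvLowMem c)).reverse)).getD j ' ' := by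
    intro j hj
    rw [pvFill_getD c0 _ _ j hj]
    by_cases h : pvLowMem (c0.getD j ' ')
    · rw [if_pos h]
      have hjO : j ∉ pvIdxs (fun c => !pvLowMem c) c0 := fun hmem => by
        have := ((pvIdxs_mem_iff (fun c => !pvLowMem c) c0 j).mp hmem).2
        simp only [Bool.not_eq_true'] at this
        rw [h] at this
        cases this
      have hnotO : c2.getD j ' ' = c1.getD j ' ' := by
        rw [hc2]
        exact pvWriteAll_getD_notin _ _ _
          (fun w hw he => hjO (by rw [← he]; exact (List.of_mem_zip hw).1)) ' '
      rw [hnotO, hc1]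
      exact pvB_pass c0 pvLowMem c0 j hj h le_rfl
    · rw [if_neg h]
      rw [hc2]
      refine pvB_pass c0 (fun c => !pvLowMem c) c1 j hj ?_ (by omega)
      show (!pvLowMem (c0.getD j ' ')) = true
      rw [Bool.not_eq_true']
      exact Bool.eq_false_iff.mpr h
  apply List.ext_getElem (by rw [hlen2, hlenf])
  intro i h1 h2
  rw [← List.getD_eq_getElem c2 ' ' h1, ← List.getD_eq_getElem _ ' ' h2]
  exact hpt i (by omega)

lemma pvB_eq_fill (s : String) :
    reverseByType_alt s = String.mk (pvFill s.toList (s.toList.filter pvLowMem).reverse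
      ((s.toList.filter (fun c => !pvLowMem c)).reverse)) := by
  have hL : ((PySem.List.enumerate s.toList (0 : Int)).filter
      (fun ic => pvLowMem ic.2)).map (fun ic => ic.1.toNat) = pvIdxs pvLowMem s.toList := by
    have := pvEnum_idxs pvLowMem s.toList 0
    simpa using this
  have hO : ((PySem.List.enumerate s.toList (0 : Int)).filter
      (fun ic => !pvLowMem ic.2)).map (fun ic => ic.1.toNat)
        = pvIdxs (fun c => !pvLowMem c) s.toList := by
    have := pvEnum_idxs (fun c => !pvLowMem c) s.toList 0
    simpa using this
  simp only [reverseByType_alt]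
  rw [hL, hO]
  set c0 := s.toList with hc0
  set idxL := pvIdxs pvLowMem c0 with hidxL
  set idxO := pvIdxs (fun c => !pvLowMem c) c0 with hidxO
  have h1 : pvTpLoop idxL c0 0 ((idxL.length : Int) - 1)
      = pvWriteAll c0 (idxL.zip ((idxL.map (fun p => c0.getD p ' ')).reverse)) := by
    have hndL : idxL.Nodup := by rw [hidxL]; exact pvIdxs_nodup _ _
    have := pvTp_eq_writeAll idxL.length idxL c0 0 (by omega)
      (by simpa using hndL) (fun j hj => pvIdxs_mem_lt _ _ j hj)
    simpa using this
  have h2 : pvTpLoop idxO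
      (pvWriteAll c0 (idxL.zip ((idxL.map (fun p => c0.getD p ' ')).reverse)))
      0 ((idxO.length : Int) - 1)
      = pvWriteAll (pvWriteAll c0 (idxL.zip ((idxL.map (fun p => c0.getD p ' ')).reverse)))
        (idxO.zip ((idxO.map (fun p =>
          (pvWriteAll c0 (idxL.zip ((idxL.map (fun p => c0.getD p ' ')).reverse))).getD p ' ')).reverse)) := by
    have := pvTp_eq_writeAll idxO.length idxO
      (pvWriteAll c0 (idxL.zip ((idxL.map (fun p => c0.getD p ' ')).reverse))) 0 (by omega)
      (by have hndO : idxO.Nodup := by rw [hidxO]; exact pvIdxs_nodup _ _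
          simpa using hndO)
      (fun j hj => by rw [pvWriteAll_length]; exact pvIdxs_mem_lt _ _ j hj)
    simpa using this
  rw [h1, h2, pvB_core]

-- ===== VERDICT (by name: the statement is the Claim_ definition above) =====
theorem reverseByType_spec : Claim_equal_reverseByType := by
  intro s _
  unfold Spec_reverseByType
  rw [pvA_eq_fill, pvB_eq_fill]
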